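-- pv_equiv track=rewrite | github.com/AmandaMaiaSM/jack-compiler-project | src/scanner/Tokenizer.py | remover_comentarios
-- ===== SOURCE A (Python) =====
-- def remover_comentarios(tokens):
--     tokens_sem_comentarios = []
--     i = 0
--     em_comentario_bloco = False
--     em_comentario_linha = False
--
--     while i < len(tokens):
--         token_atual = tokens[i]
--
--         if em_comentario_bloco:
--             if token_atual == '*' and i + 1 < len(tokens) and tokens[i + 1] == '/':
--                 em_comentario_bloco = False
--                 i += 2
--                 continue
--             if token_atual == "\n":
--                 tokens_sem_comentarios.append(token_atual)
--             i += 1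
--             continue
--
--         if em_comentario_linha:
--             if token_atual == "\n":
--                 em_comentario_linha = False
--                 tokens_sem_comentarios.append(token_atual)
--             i += 1
--             continue
--
--         if token_atual == '/' and i + 1 < len(tokens):
--             proximo = tokens[i + 1]
--             if proximo == '/':
--                 em_comentario_linha = True
--                 i += 2
--                 continue
--             if proximo == '*':
--                 em_comentario_bloco = True
--                 i += 2
--                 continue
--
--         tokens_sem_comentarios.append(token_atual)
--         i += 1
--
--     return tokens_sem_comentarios
-- ===== SOURCE B (Python) =====
-- NORMAL, SLASH, LINE, BLOCK, STARB = range(5)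
--
-- def remover_comentarios(tokens):
--     state = NORMAL
--     out = []
--     for tok in tokens:
--         if state == NORMAL:
--             if tok == '/':
--                 state = SLASH
--             else:
--                 out.append(tok)
--         elif state == SLASH:
--             if tok == '/':
--                 state = LINE
--             elif tok == '*':
--                 state = BLOCK
--             else:
--                 out.append('/')
--                 out.append(tok)
--                 state = NORMAL
--         elif state == LINE:
--             if tok == '\n':
--                 out.append(tok)
--                 state = NORMAL
--         elif state == BLOCK:
--             if tok == '*':
--                 state = STARB
--             elif tok == '\n':
--                 out.append(tok)
--         else:  # STARB
--             if tok == '/':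
--                 state = NORMAL
--             elif tok != '*':
--                 if tok == '\n':
--                     out.append(tok)
--                 state = BLOCK
--     if state == SLASH:
--         out.append('/')
--     return out
-- ===== Notes on version B (the rewrite author's own statement) =====
-- stated objective: idiomatic
-- what changed: Replaces A's index loop with tokens[i+1] lookahead by a single lookahead-free pass over the tokens driven by a 5-state machine (NORMAL/SAW_SLASH/LINE/BLOCK/BLOCK_SAW_STAR) with a pending-slash flush at end of input.
import Mathlib
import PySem

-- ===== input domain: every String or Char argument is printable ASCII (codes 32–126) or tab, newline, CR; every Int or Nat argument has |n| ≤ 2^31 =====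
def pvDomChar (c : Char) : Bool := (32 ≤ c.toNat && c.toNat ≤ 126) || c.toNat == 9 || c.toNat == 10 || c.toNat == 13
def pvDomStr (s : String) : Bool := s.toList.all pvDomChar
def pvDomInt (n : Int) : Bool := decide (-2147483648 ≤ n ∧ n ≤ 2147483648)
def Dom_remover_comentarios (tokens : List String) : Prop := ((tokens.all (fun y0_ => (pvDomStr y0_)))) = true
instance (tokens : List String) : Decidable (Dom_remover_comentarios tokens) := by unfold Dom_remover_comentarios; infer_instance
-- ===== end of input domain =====

-- B replaces A's index loop with one-token lookahead by a lookahead-free 5-state machine pass (idiomatic decomposition; same cost).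

-- ===== PORT A =====
-- A's while loop over index i, advancing by 1 or 2; ported as recursion on the remaining suffix
-- (tokens[i+1] = head of the tail), with the two Boolean flags and the accumulator as loop state.
def goA : List String → Bool → Bool → List String → List String
  | [], _, _, acc => acc
  | [t], bloco, linha, acc =>
    -- i + 1 < len(tokens) is false: neither lookahead test can fire
    if bloco then goA [] bloco linha (if t = "\n" then acc ++ [t] else acc)
    else if linha then
      if t = "\n" then goA [] bloco false (acc ++ [t]) else goA [] bloco linha acc
    else goA [] bloco linha (acc ++ [t])
  | t :: r :: rest', bloco, linha, acc =>
    -- i + 1 < len(tokens) holds: r = tokens[i + 1]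
    if bloco then
      if t = "*" ∧ r = "/" then goA rest' false linha acc
      else goA (r :: rest') bloco linha (if t = "\n" then acc ++ [t] else acc)
    else if linha then
      if t = "\n" then goA (r :: rest') bloco false (acc ++ [t])
      else goA (r :: rest') bloco linha acc
    else if t = "/" then
      if r = "/" then goA rest' bloco true acc
      else if r = "*" then goA rest' true linha acc
      else goA (r :: rest') bloco linha (acc ++ [t])
    else goA (r :: rest') bloco linha (acc ++ [t])

def remover_comentarios (tokens : List String) : List String :=
  goA tokens false false []

-- ===== PORT B =====
inductive PState | normal | slash | line | block | starb
deriving DecidableEq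

def stepB (s : PState × List String) (tok : String) : PState × List String :=
  match s.1 with
  | .normal =>
    if tok = "/" then (.slash, s.2) else (.normal, s.2 ++ [tok])
  | .slash =>
    if tok = "/" then (.line, s.2)
    else if tok = "*" then (.block, s.2)
    else (.normal, s.2 ++ ["/"] ++ [tok])
  | .line =>
    if tok = "\n" then (.normal, s.2 ++ [tok]) else (.line, s.2)
  | .block =>
    if tok = "*" then (.starb, s.2)
    else if tok = "\n" then (.block, s.2 ++ [tok])
    else (.block, s.2)
  | .starb =>
    if tok = "/" then (.normal, s.2)
    else if tok = "*" then (.starb, s.2)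
    else if tok = "\n" then (.block, s.2 ++ [tok])
    else (.block, s.2)

def finB (s : PState × List String) : List String :=
  if s.1 = .slash then s.2 ++ ["/"] else s.2

def remover_comentarios_alt (tokens : List String) : List String :=
  finB (tokens.foldl stepB (.normal, []))

-- ===== PRECONDITION & SPEC =====
def Spec_remover_comentarios (tokens : List String) (out : List String) : Prop := out = remover_comentarios_alt tokens
instance (tokens : List String) (out : List String) : Decidable (Spec_remover_comentarios tokens out) := by unfold Spec_remover_comentarios; infer_instance

-- ===== CLAIM =====
def Claim_equal_remover_comentarios : Prop := ∀ (tokens : List String), Dom_remover_comentarios tokens → Spec_remover_comentarios tokens (remover_comentarios tokens)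

-- ===== LEMMAS AND PROOFS =====
-- One-step unfolding lemmas for A's loop (one per branch of A's while body).
theorem goA_nil (b l : Bool) (acc : List String) : goA [] b l acc = acc := by
  simp [goA]

theorem goA_single_norm (t : String) (acc : List String) :
    goA [t] false false acc = acc ++ [t] := by
  simp [goA]

theorem goA_single_block (t : String) (acc : List String) :
    goA [t] true false acc = if t = "\n" then acc ++ [t] else acc := by
  by_cases h : t = "\n" <;> simp [goA, h]

theorem goA_block_end (rest acc : List String) :
    goA ("*" :: "/" :: rest) true false acc = goA rest false false acc := by
  simp [goA]

theorem goA_block_skip (t r : String) (rest acc : List String) (h : ¬(t = "*" ∧ r = "/")) :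
    goA (t :: r :: rest) true false acc
      = goA (r :: rest) true false (if t = "\n" then acc ++ [t] else acc) := by
  simp [goA, h]

theorem goA_line_nl (rest acc : List String) :
    goA ("\n" :: rest) false true acc = goA rest false false (acc ++ ["\n"]) := by
  cases rest <;> simp [goA]

theorem goA_line_other (t : String) (rest acc : List String) (h : t ≠ "\n") :
    goA (t :: rest) false true acc = goA rest false true acc := by
  cases rest <;> simp [goA, h]

theorem goA_norm_line (rest acc : List String) :
    goA ("/" :: "/" :: rest) false false acc = goA rest false true acc := by
  simp [goA]

theorem goA_norm_block (rest acc : List String) :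
    goA ("/" :: "*" :: rest) false false acc = goA rest true false acc := by
  simp [goA]

theorem goA_norm_other (t r : String) (rest acc : List String) (ht : t ≠ "/") :
    goA (t :: r :: rest) false false acc = goA (r :: rest) false false (acc ++ [t]) := by
  simp [goA, ht]

theorem goA_norm_flush (r : String) (rest acc : List String) (h1 : r ≠ "/") (h2 : r ≠ "*") :
    goA ("/" :: r :: rest) false false acc = goA (r :: rest) false false (acc ++ ["/"]) := by
  simp [goA, h1, h2]

-- Simulation: A's flag configurations correspond to B's states NORMAL/LINE/BLOCK, and A's
-- position just before an unconsumed '/' (resp. '*' inside a block) corresponds to SLASH (resp. STARB).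
theorem sim (ts : List String) : ∀ acc : List String,
    goA ts false false acc = finB (ts.foldl stepB (.normal, acc))
  ∧ goA ts false true acc = finB (ts.foldl stepB (.line, acc))
  ∧ goA ts true false acc = finB (ts.foldl stepB (.block, acc))
  ∧ goA ("/" :: ts) false false acc = finB (ts.foldl stepB (.slash, acc))
  ∧ goA ("*" :: ts) true false acc = finB (ts.foldl stepB (.starb, acc)) := by
  induction ts with
  | nil =>
    intro acc
    refine ⟨?_, ?_, ?_, ?_, ?_⟩
    · simp [goA_nil, finB]
    · simp [goA_nil, finB]
    · simp [goA_nil, finB]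
    · simp [goA_single_norm, finB]
    · simp [goA_single_block, finB]
  | cons t rest ih =>
    intro acc
    have h1 : ∀ acc : List String, goA (t :: rest) false false acc
        = finB ((t :: rest).foldl stepB (.normal, acc)) := by
      intro acc
      by_cases ht : t = "/"
      · subst ht
        simpa [stepB] using (ih acc).2.2.2.1
      · cases rest with
        | nil => rw [goA_single_norm]; simp [stepB, finB, ht]
        | cons r rest' =>
          rw [goA_norm_other t r rest' acc ht]
          simpa [stepB, ht] using (ih (acc ++ [t])).1
    have h2 : goA (t :: rest) false true acc
        = finB ((t :: rest).foldl stepB (.line, acc)) := by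
      by_cases ht : t = "\n"
      · subst ht
        rw [goA_line_nl]
        simpa [stepB] using (ih (acc ++ ["\n"])).1
      · rw [goA_line_other t rest acc ht]
        simpa [stepB, ht] using (ih acc).2.1
    have h3 : ∀ acc : List String, goA (t :: rest) true false acc
        = finB ((t :: rest).foldl stepB (.block, acc)) := by
      intro acc
      by_cases hs : t = "*"
      · subst hs
        simpa [stepB] using (ih acc).2.2.2.2
      · cases rest with
        | nil =>
          rw [goA_single_block]
          by_cases hn : t = "\n" <;> simp [stepB, finB, goA_nil, hs, hn]
        | cons r rest' =>
          rw [goA_block_skip t r rest' acc (by simp [hs])]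
          by_cases hn : t = "\n"
          · subst hn
            simpa [stepB, hs] using (ih (acc ++ ["\n"])).2.2.1
          · simpa [stepB, hs, hn] using (ih acc).2.2.1
    refine ⟨h1 acc, h2, h3 acc, ?_, ?_⟩
    · by_cases ht : t = "/"
      · subst ht
        rw [goA_norm_line]
        simpa [stepB] using (ih acc).2.1
      · by_cases hs : t = "*"
        · subst hs
          rw [goA_norm_block]
          simpa [stepB] using (ih acc).2.2.1
        · rw [goA_norm_flush t rest acc ht hs, h1 (acc ++ ["/"])]
          simp [stepB, ht, hs]
    · by_cases ht : t = "/"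
      · subst ht
        rw [goA_block_end]
        simpa [stepB] using (ih acc).1
      · by_cases hs : t = "*"
        · subst hs
          rw [goA_block_skip "*" "*" rest acc (by simp)]
          simpa [stepB] using (ih acc).2.2.2.2
        · rw [goA_block_skip "*" t rest acc (by simp [ht]), if_neg (by decide), h3 acc]
          by_cases hn : t = "\n" <;> simp [stepB, ht, hs, hn]

-- ===== VERDICT =====
theorem remover_comentarios_spec : Claim_equal_remover_comentarios := by
  intro tokens _
  unfold Spec_remover_comentarios remover_comentarios remover_comentarios_alt
  exact (sim tokens []).1
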